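-- pv_equiv track=rewrite | github.com/goldenfamilyfarms/correlation-station | .archive/sense-apps/arda/arda_app/dll/blacklist.py | analyze_blacklist_table
-- ===== SOURCE A (Python) =====
-- def analyze_blacklist_table(data: list):
--     """Analyze the results of the blacklist table."""
--     timeouts = 0
--     blacklist_reason = []
--     blacklisted = False
--     for row in data:
--         if row.get("Status") == "OK":
--             continue
--         if row.get("Status") == "TIMEOUT":
--             timeouts += 1
--             if len(data) == timeouts:
--                 return "Timeout", ""
--             continue
--         if row.get("Info", "").upper() in ["UCEPROTECTL1", "UCEPROTECTL2", "UCEPROTECTL3", "RATS NOPTR", "RATS DYNA"]: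
--             continue
--         blacklist_reason.append(row.get("Info"))
--         blacklisted = True
--     return blacklisted, blacklist_reason
-- ===== SOURCE B (Python) =====
-- def analyze_blacklist_table(data: list):
--     """Analyze the results of the blacklist table."""
--     if data and all(row.get("Status") == "TIMEOUT" for row in data):
--         return "Timeout", ""
--     skip = {"UCEPROTECTL1", "UCEPROTECTL2", "UCEPROTECTL3", "RATS NOPTR", "RATS DYNA"}
--     reasons = [row.get("Info") for row in data
--                if row.get("Status") not in ("OK", "TIMEOUT")
--                and row.get("Info", "").upper() not in skip]
--     return len(reasons) > 0, reasons
-- ===== Notes on version B (the rewrite author's own statement) =====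
-- stated objective: simpler
-- what changed: Replaces the stateful loop (timeouts counter, blacklisted flag, positional early return) with an upfront all-TIMEOUT predicate plus a single filtering comprehension whose length gives the flag.
-- outside the precondition, e.g. on analyze_blacklist_table([{'Status': 'TIMEOUT'}]): A returns ('Timeout', ''), B returns ('Timeout', '')
import Mathlib
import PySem

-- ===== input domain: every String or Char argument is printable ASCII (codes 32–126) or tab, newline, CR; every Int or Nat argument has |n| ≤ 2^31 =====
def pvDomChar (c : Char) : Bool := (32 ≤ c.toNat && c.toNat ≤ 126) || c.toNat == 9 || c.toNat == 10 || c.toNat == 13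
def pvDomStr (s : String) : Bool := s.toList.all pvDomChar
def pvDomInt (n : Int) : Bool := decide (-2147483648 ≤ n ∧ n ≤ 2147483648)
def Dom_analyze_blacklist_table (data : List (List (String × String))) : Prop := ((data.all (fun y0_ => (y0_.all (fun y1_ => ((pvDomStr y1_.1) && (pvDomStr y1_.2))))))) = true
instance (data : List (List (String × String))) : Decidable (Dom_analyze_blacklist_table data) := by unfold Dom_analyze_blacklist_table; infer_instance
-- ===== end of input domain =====

-- B replaces A's stateful loop (timeouts counter, blacklisted flag, positional early return)
-- with an upfront all-TIMEOUT check plus one filtering pass; simpler decomposition, same cost.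


-- ===== PORT A =====
-- row.get(k) = first-match association-list lookup (dicts have unique keys, so first match is exact)
def pvGet (row : List (String × String)) (k : String) : Option String :=
  List.lookup k row

def pvGetD (row : List (String × String)) (k : String) (d : String) : String :=
  (List.lookup k row).getD d

-- A's loop, step for step; `none` marks the early `return "Timeout", ""` (a str pair, outside
-- the declared return type — excluded by Pre_).
def pvLoopA (rows : List (List (String × String))) (n : Int) (timeouts : Int)
    (reason : List (Option String)) (bl : Bool) : Option (Bool × List (Option String)) :=
  match rows with
  | [] => some (bl, reason)
  | row :: rest =>
    if pvGet row "Status" = some "OK" then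
      pvLoopA rest n timeouts reason bl
    else if pvGet row "Status" = some "TIMEOUT" then
      if n = timeouts + 1 then none
      else pvLoopA rest n (timeouts + 1) reason bl
    else if PySem.Str.upper (pvGetD row "Info" "") ∈
        ["UCEPROTECTL1", "UCEPROTECTL2", "UCEPROTECTL3", "RATS NOPTR", "RATS DYNA"] then
      pvLoopA rest n timeouts reason bl
    else
      pvLoopA rest n timeouts (reason ++ [pvGet row "Info"]) true

def analyze_blacklist_table (data : List (List (String × String))) : Bool × List (Option String) :=
  ((pvLoopA data (data.length : Int) 0 [] false).getD (false, []))

-- ===== PORT B =====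
def pvKeep (row : List (String × String)) : Bool :=
  pvGet row "Status" ≠ some "OK" && pvGet row "Status" ≠ some "TIMEOUT" &&
  PySem.Str.upper (pvGetD row "Info" "") ∉
    ["UCEPROTECTL1", "UCEPROTECTL2", "UCEPROTECTL3", "RATS NOPTR", "RATS DYNA"]

def analyze_blacklist_table_alt (data : List (List (String × String))) : Bool × List (Option String) :=
  if data ≠ [] ∧ data.all (fun row => pvGet row "Status" = some "TIMEOUT") then
    (false, [])   -- Python B returns ("Timeout", "") here, outside the declared type; excluded by Pre_
  else
    let reasons := (data.filter pvKeep).map (fun row => pvGet row "Info")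
    (decide (0 < reasons.length), reasons)

-- ===== PRECONDITION & SPEC =====
-- Pre_ excludes exactly the nonempty all-TIMEOUT inputs, on which both Pythons return
-- ("Timeout", ""), a pair of strings that is not a value of the declared Bool × list type.
def Pre_analyze_blacklist_table (data : List (List (String × String))) : Prop :=
  ¬ (data ≠ [] ∧ ∀ row ∈ data, pvGet row "Status" = some "TIMEOUT")
instance (data : List (List (String × String))) : Decidable (Pre_analyze_blacklist_table data) := by
  unfold Pre_analyze_blacklist_table; infer_instance

def pvWitness_analyze_blacklist_table : (List (List (String × String))) :=
  [[("Status", "X"), ("Info", "bad")], [("Status", "OK")]]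

def Spec_analyze_blacklist_table (data : List (List (String × String))) (out : Bool × List (Option String)) : Prop := out = analyze_blacklist_table_alt data
instance (data : List (List (String × String))) (out : Bool × List (Option String)) : Decidable (Spec_analyze_blacklist_table data out) := by unfold Spec_analyze_blacklist_table; infer_instance

-- ===== CLAIM (what is proved, stated in full; the proofs are below) =====
def Claim_equal_analyze_blacklist_table : Prop := ∀ (data : List (List (String × String))), Dom_analyze_blacklist_table data → Pre_analyze_blacklist_table data → Spec_analyze_blacklist_table data (analyze_blacklist_table data)

-- ===== LEMMAS AND PROOFS =====

-- Invariant: if the TIMEOUT count can never reach n, A's loop returns the accumulated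
-- flag/list extended by B's filtered pass over the remaining rows.
theorem pvLoopA_eq (rows : List (List (String × String))) (n : Int) :
    ∀ (t : Int) (acc : List (Option String)) (bl : Bool),
    t + rows.length ≤ n →
    ((∀ row ∈ rows, pvGet row "Status" = some "TIMEOUT") → rows = [] ∨ t + rows.length < n) →
    pvLoopA rows n t acc bl =
      some (bl || !(rows.filter pvKeep).isEmpty,
            acc ++ (rows.filter pvKeep).map (fun row => pvGet row "Info")) := by
  induction rows with
  | nil => intro t acc bl _ _; simp [pvLoopA]
  | cons row rest ih =>
    intro t acc bl hle hall
    have hlen : t + (1 + (rest.length : Int)) ≤ n := by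
      simpa [add_comm] using hle
    simp only [pvLoopA]
    by_cases hok : pvGet row "Status" = some "OK"
    · have hk : pvKeep row = false := by simp [pvKeep, hok]
      have htail : (∀ r ∈ rest, pvGet r "Status" = some "TIMEOUT") → rest = [] ∨ t + rest.length < n := by
        intro _
        by_cases hr : rest = []
        · exact Or.inl hr
        · exact Or.inr (by omega)
      rw [if_pos hok, ih t acc bl (by omega) htail]
      simp [hk]
    · rw [if_neg hok]
      by_cases hto : pvGet row "Status" = some "TIMEOUT"
      · have hk : pvKeep row = false := by simp [pvKeep, hto]
        rw [if_pos hto]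
        have hne : ¬ n = t + 1 := by
          intro hn
          have hrest : rest = [] := by
            have : (rest.length : Int) = 0 := by omega
            simpa using this
          subst hrest
          rcases hall (by
            intro r hr
            have : r = row := by simpa using hr
            rw [this]; exact hto) with h | h
          · simp at h
          · simp at h; omega
        have hallT : (∀ r ∈ rest, pvGet r "Status" = some "TIMEOUT") → rest = [] ∨ (t + 1) + rest.length < n := by
          intro h
          rcases hall (by
            intro r hr
            rcases List.mem_cons.mp hr with h1 | h1
            · rw [h1]; exact hto
            · exact h r h1) with h1 | h1
          · simp at h1
          · right
            have : t + ((row :: rest).length : Int) < n := h1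
            simp at this; omega
        rw [if_neg hne, ih (t + 1) acc bl (by omega) hallT]
        simp [hk]
      · rw [if_neg hto]
        have htail : (∀ r ∈ rest, pvGet r "Status" = some "TIMEOUT") → rest = [] ∨ t + rest.length < n := by
          intro _
          by_cases hr : rest = []
          · exact Or.inl hr
          · exact Or.inr (by omega)
        by_cases hup : PySem.Str.upper (pvGetD row "Info" "") ∈
            ["UCEPROTECTL1", "UCEPROTECTL2", "UCEPROTECTL3", "RATS NOPTR", "RATS DYNA"]
        · have hk : pvKeep row = false := by
            simp only [pvKeep]; simp [hok, hto, hup]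
          rw [if_pos hup, ih t acc bl (by omega) htail]
          simp [hk]
        · have hk : pvKeep row = true := by
            simp only [pvKeep]; simp [hok, hto, hup]
          rw [if_neg hup, ih t (acc ++ [pvGet row "Info"]) true (by omega) htail]
          simp [hk]

-- ===== VERDICT (by name: the statement is the Claim_ definition above) =====
theorem analyze_blacklist_table_spec : Claim_equal_analyze_blacklist_table := by
  intro data _ hpre
  unfold Spec_analyze_blacklist_table
  unfold Pre_analyze_blacklist_table at hpre
  have hmain := pvLoopA_eq data (data.length : Int) 0 [] false
    (by omega)
    (fun h => by
      by_cases hd : data = []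
      · exact Or.inl hd
      · exact absurd ⟨hd, h⟩ hpre)
  unfold analyze_blacklist_table analyze_blacklist_table_alt
  rw [if_neg (by
    intro hc
    exact hpre ⟨hc.1, fun r hr => by simpa using (List.all_eq_true.mp hc.2) r hr⟩)]
  rw [hmain]
  cases List.filter pvKeep data <;> simp
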